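-- pv_equiv track=rewrite | github.com/mjlovesz/sync-ait | ait/components/benchmark/ais_bench/infer/utils.py | list_share
-- ===== SOURCE A (Python) =====
-- def list_share(list_a, count, num, left):
--     head = 0
--     for i in range(count):
--         if i < left:
--             every_chunk = list_a[head: head + num + 1]
--             head = head + num + 1
--         else:
--             every_chunk = list_a[head: head + num]
--             head = head + num
--         yield every_chunk
-- ===== SOURCE B (Python) =====
-- def list_share(list_a, count, num, left):
--     for i in range(count):
--         start = i * num + min(i, max(left, 0))
--         size = num + (1 if i < left else 0)
--         yield list_a[start:start + size]
-- ===== Notes on version B (the rewrite author's own statement) =====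
-- stated objective: alternative
-- what changed: Replaces the running `head` accumulator with a stateless closed-form per chunk: chunk i is list_a[i*num+min(i,left) : +num(+1)], so each chunk's slice bounds are computed independently instead of threaded through the loop.
import Mathlib
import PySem

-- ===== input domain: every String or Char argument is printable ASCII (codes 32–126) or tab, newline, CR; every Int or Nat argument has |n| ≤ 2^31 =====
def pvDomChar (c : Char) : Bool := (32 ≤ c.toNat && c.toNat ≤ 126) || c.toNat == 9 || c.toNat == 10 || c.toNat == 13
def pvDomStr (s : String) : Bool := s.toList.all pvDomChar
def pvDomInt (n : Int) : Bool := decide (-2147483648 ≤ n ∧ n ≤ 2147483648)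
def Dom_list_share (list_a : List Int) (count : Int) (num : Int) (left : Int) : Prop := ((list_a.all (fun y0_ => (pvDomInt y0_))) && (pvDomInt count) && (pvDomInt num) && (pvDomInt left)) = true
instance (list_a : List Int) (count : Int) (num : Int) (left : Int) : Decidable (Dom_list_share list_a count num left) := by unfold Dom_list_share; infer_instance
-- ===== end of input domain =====

-- B replaces A's running `head` accumulator with a stateless closed form for each chunk's
-- slice bounds (alternative decomposition, same cost).

-- ===== PORT A =====
-- A is a generator; its port returns the list of yielded chunks (the observable value).
def list_share (list_a : List Int) (count : Int) (num : Int) (left : Int) : List (List Int) :=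
  ((PySem.List.pyRange 0 count 1).foldl
    (fun (st : Int × List (List Int)) i =>
      if i < left then
        (st.1 + num + 1, st.2 ++ [PySem.List.slice list_a (some st.1) (some (st.1 + num + 1))])
      else
        (st.1 + num, st.2 ++ [PySem.List.slice list_a (some st.1) (some (st.1 + num))]))
    (0, [])).2

-- ===== PORT B =====
def list_share_alt (list_a : List Int) (count : Int) (num : Int) (left : Int) : List (List Int) :=
  (PySem.List.pyRange 0 count 1).map (fun i =>
    PySem.List.slice list_a (some (i * num + min i (max left 0)))
      (some (i * num + min i (max left 0) + (num + (if i < left then 1 else 0)))))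

-- ===== PRECONDITION & SPEC =====
def Spec_list_share (list_a : List Int) (count : Int) (num : Int) (left : Int) (out : List (List Int)) : Prop := out = list_share_alt list_a count num left
instance (list_a : List Int) (count : Int) (num : Int) (left : Int) (out : List (List Int)) : Decidable (Spec_list_share list_a count num left out) := by unfold Spec_list_share; infer_instance

-- ===== CLAIM (what is proved, stated in full; the proofs are below) =====
def Claim_equal_list_share : Prop := ∀ (list_a : List Int) (count : Int) (num : Int) (left : Int), Dom_list_share list_a count num left → Spec_list_share list_a count num left (list_share list_a count num left)

-- ===== LEMMAS AND PROOFS =====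

-- Loop invariant: starting A's fold at index a ≥ 0 with head = a*num + min a (max left 0),
-- the fold appends exactly B's chunks for indices a..b-1.
theorem list_share_loop (list_a : List Int) (num left : Int) :
    ∀ (n : Nat) (a : Int) (acc : List (List Int)), 0 ≤ a →
    ((PySem.List.pyRange a (a + n) 1).foldl
      (fun (st : Int × List (List Int)) i =>
        if i < left then
          (st.1 + num + 1, st.2 ++ [PySem.List.slice list_a (some st.1) (some (st.1 + num + 1))])
        else
          (st.1 + num, st.2 ++ [PySem.List.slice list_a (some st.1) (some (st.1 + num))]))
      (a * num + min a (max left 0), acc)).2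
    = acc ++ (PySem.List.pyRange a (a + n) 1).map (fun i =>
        PySem.List.slice list_a (some (i * num + min i (max left 0)))
          (some (i * num + min i (max left 0) + (num + (if i < left then 1 else 0))))) := by
  intro n
  induction n with
  | zero =>
    intro a acc _
    simp [PySem.List.pyRange_one_eq_nil (le_refl a)]
  | succ m ih =>
    intro a acc ha
    rw [PySem.List.pyRange_one_cons (by push_cast; omega)]
    simp only [List.foldl_cons, List.map_cons]
    have h2 : a + (m + 1 : Nat) = (a + 1) + (m : Nat) := by push_cast; ring
    by_cases h : a < left
    · have h1 : min a (max left 0) = a := by omega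
      have h1' : min (a + 1) (max left 0) = a + 1 := by omega
      have hkey : a * num + min a (max left 0) + num + 1
          = (a + 1) * num + min (a + 1) (max left 0) := by rw [h1, h1']; ring
      simp only [if_pos h]
      rw [hkey, h2, ih (a + 1) _ (by omega)]
      simp only [List.append_assoc, List.singleton_append]
      congr 3
      rw [h1, h1']; ring_nf
    · have h1 : min a (max left 0) = max left 0 := by omega
      have h1' : min (a + 1) (max left 0) = max left 0 := by omega
      have hkey : a * num + min a (max left 0) + num
          = (a + 1) * num + min (a + 1) (max left 0) := by rw [h1, h1']; ring
      simp only [if_neg h]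
      rw [hkey, h2, ih (a + 1) _ (by omega)]
      simp only [List.append_assoc, List.singleton_append]
      congr 3
      rw [h1, h1']; ring_nf

-- ===== VERDICT (by name: the statement is the Claim_ definition above) =====
theorem list_share_spec : Claim_equal_list_share := by
  intro list_a count num left _
  unfold Spec_list_share list_share list_share_alt
  by_cases hc : count ≤ 0
  · simp [PySem.List.pyRange_one_eq_nil hc]
  · have hcount : count = 0 + (count.toNat : Int) := by omega
    rw [hcount]
    have := list_share_loop list_a num left count.toNat 0 [] (le_refl 0)
    simpa using this
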